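-- pv_equiv track=rewrite | github.com/danvk/hybrid-boggle | boggle/trie.py | is_boggle_word
-- ===== SOURCE A (Python) =====
-- def is_boggle_word(word: str):
--     size = len(word)
--     if size < 3:
--         return False
--     for i, let in enumerate(word):
--         if let < "a" or let > "z":
--             return False
--         if let == "q" and (i + 1 >= size or word[i + 1] != "u"):
--             return False
--     return True
-- ===== SOURCE B (Python) =====
-- def is_boggle_word(word: str):
--     if len(word) < 3:
--         return False
--     if any(c < "a" or "z" < c for c in word):
--         return False
--     return "q" not in word.replace("qu", "")
-- ===== Notes on version B (the rewrite author's own statement) =====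
-- stated objective: alternative
-- what changed: Replaces A's index-aware per-character loop with i+1 lookahead by builtin staged passes: an alphabet-range check, then str.replace deletes every q-followed-by-u digram and the word is legal iff no lone q survives.
import Mathlib
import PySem

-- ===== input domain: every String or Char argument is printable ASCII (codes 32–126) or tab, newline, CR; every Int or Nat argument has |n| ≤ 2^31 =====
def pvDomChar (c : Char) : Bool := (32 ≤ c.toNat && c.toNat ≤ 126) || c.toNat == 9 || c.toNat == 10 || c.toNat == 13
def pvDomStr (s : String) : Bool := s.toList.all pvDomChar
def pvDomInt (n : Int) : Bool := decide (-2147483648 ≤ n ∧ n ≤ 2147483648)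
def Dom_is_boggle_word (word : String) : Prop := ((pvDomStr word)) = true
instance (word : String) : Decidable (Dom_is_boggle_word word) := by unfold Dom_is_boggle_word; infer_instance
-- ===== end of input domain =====

-- B replaces A's index-aware lookahead loop by builtin passes: an alphabet check plus
-- deleting every 'qu' digram with str.replace and testing that no 'q' survives (alternative, same cost).

-- ===== PORT A =====
-- the for-loop over enumerate(word), with word[i+1] as a guarded lookup into the full char list
def aGo (chars : List Char) (size : Int) : List (Int × Char) → Bool
  | [] => true
  | (i, c) :: rest =>
    if c < 'a' || c > 'z' then false
    else if c = 'q' && (decide (i + 1 ≥ size) || decide (PySem.Chars.pyGet? chars (i + 1) ≠ some 'u')) then false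
    else aGo chars size rest

def is_boggle_word (word : String) : Bool :=
  let size : Int := PySem.Str.len word
  if size < 3 then false
  else aGo word.toList size (PySem.List.enumerate word.toList)

-- ===== PORT B =====
-- Source B: length guard; any(c < 'a' or 'z' < c); then "q" not in word.replace("qu", "")
def is_boggle_word_alt (word : String) : Bool :=
  if PySem.Str.len word < 3 then false
  else if word.toList.any (fun c => c < 'a' || 'z' < c) then false
  else !(PySem.Str.isIn "q" (PySem.Str.replace word "qu" ""))

-- ===== PRECONDITION & SPEC =====
def Spec_is_boggle_word (word : String) (out : Bool) : Prop := out = is_boggle_word_alt word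
instance (word : String) (out : Bool) : Decidable (Spec_is_boggle_word word out) := by unfold Spec_is_boggle_word; infer_instance

-- ===== CLAIM (what is proved, stated in full; the proofs are below) =====
def Claim_equal_is_boggle_word : Prop := ∀ (word : String), Dom_is_boggle_word word → Spec_is_boggle_word word (is_boggle_word word)

-- ===== LEMMAS AND PROOFS =====

-- proof-only reference predicate: the language (letter | 'qu')* with letters 'a'..'z' \ {'q'}
def okW : List Char → Bool
  | [] => true
  | c :: rest =>
    if c = 'q' then
      match rest with
      | 'u' :: rest' => okW rest'
      | _ => false
    else if 'a' ≤ c && c ≤ 'z' then okW rest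
    else false

lemma okW_cons (c : Char) (rest : List Char) :
    okW (c :: rest) =
      (if c = 'q' then (match rest with | 'u' :: r => okW r | _ => false)
       else if 'a' ≤ c && c ≤ 'z' then okW rest else false) := by
  cases rest with
  | nil => simp [okW]
  | cons d r => by_cases hu : d = 'u' <;> simp [okW, hu]

-- A's loop computes okW
lemma key_aux (chars : List Char) :
    ∀ n i : Nat, chars.length - i ≤ n →
      aGo chars (chars.length : Int) (PySem.List.enumerate (chars.drop i) i) = okW (chars.drop i) := by
  intro n
  induction n with
  | zero =>
    intro i h
    have hnil : chars.drop i = [] := List.drop_eq_nil_of_le (by omega)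
    simp [hnil, aGo, okW, PySem.List.enumerate_nil]
  | succ n ih =>
    intro i h
    cases hd : chars.drop i with
    | nil => simp [aGo, okW, PySem.List.enumerate_nil]
    | cons c rest =>
      have hlen : i < chars.length := by
        by_contra hle
        simp [List.drop_eq_nil_of_le (by omega : chars.length ≤ i)] at hd
      have hrest : chars.drop (i + 1) = rest := by
        rw [← List.tail_drop, hd]; rfl
      have hlr : rest.length = chars.length - (i + 1) := by
        have := congrArg List.length hrest; simpa using this.symm
      rw [PySem.List.enumerate_cons]
      by_cases hq : c = 'q'
      · subst hq
        cases hr : rest with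
        | nil =>
          rw [hr] at hlr
          have hge : (↑chars.length : Int) ≤ ↑i + 1 := by
            simp at hlr; omega
          simp [aGo, okW, hge]
        | cons d rest' =>
          have hget : PySem.List.pyGet? chars (↑i + 1) = some d := by
            have h1 : ((i + 1 : Nat) : Int) = ↑i + 1 := by push_cast; ring
            have h2 : (chars.drop (i+1))[0]? = chars[i+1+0]? := List.getElem?_drop
            rw [← h1, PySem.List.pyGet?_natCast]
            simpa [hrest, hr] using h2.symm
          have hlt : ¬ ((↑chars.length : Int) ≤ ↑i + 1) := by
            rw [hr] at hlr
            have : i + 2 ≤ chars.length := by simp at hlr; omega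
            omega
          by_cases hu : d = 'u'
          · subst hu
            have hrest2 : chars.drop (i + 2) = rest' := by
              rw [show i + 2 = (i + 1) + 1 from rfl, ← List.tail_drop, hrest, hr]; rfl
            have hih := ih (i + 2) (by omega)
            rw [hrest2] at hih
            push_cast at hih
            rw [PySem.List.enumerate_cons]
            simp only [aGo, okW]
            simp [hget, hlt]
            rw [show ((i:Int) + 1 + 1) = (i:Int) + 2 by ring]
            exact hih
          · simp [aGo, okW, hget, hlt, hu]
      · by_cases hab : 'a' ≤ c ∧ c ≤ 'z'
        · have hih := ih (i + 1) (by omega)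
          rw [hrest] at hih
          push_cast at hih
          rw [okW_cons]
          simp [aGo, hq, not_lt.2 hab.1, not_lt.2 hab.2, hab.1, hab.2, hih]
        · have hcr : c < 'a' ∨ 'z' < c := by
            rcases not_and_or.1 hab with h1 | h2
            · exact Or.inl (not_le.1 h1)
            · exact Or.inr (not_le.1 h2)
          rw [okW_cons]
          rcases hcr with h1 | h1 <;> simp [aGo, h1, hq, not_le.2 h1]

-- proof-only: the result of s.replace("qu", "") on a char list
def stripQu : List Char → List Char
  | 'q' :: 'u' :: t => stripQu t
  | c :: t => c :: stripQu t
  | [] => []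

lemma replace_go_eq :
    ∀ (fuel : Nat) (l acc : List Char), l.length ≤ fuel →
      PySem.Chars.replace.go ['q', 'u'] [] fuel l acc = acc.reverse ++ stripQu l := by
  intro fuel
  induction fuel with
  | zero =>
    intro l acc h
    have : l = [] := List.eq_nil_of_length_eq_zero (by omega)
    subst this
    simp [PySem.Chars.replace.go, stripQu]
  | succ n ih =>
    intro l acc h
    cases l with
    | nil => simp [PySem.Chars.replace.go, stripQu]
    | cons c t =>
      rw [PySem.Chars.replace.go]
      by_cases hp : List.isPrefixOf ['q', 'u'] (c :: t) = true
      · obtain ⟨t', ht'⟩ : ∃ t', c :: t = 'q' :: 'u' :: t' := by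
          rcases (List.isPrefixOf_iff_prefix.mp hp) with ⟨s, hs⟩
          exact ⟨s, hs.symm⟩
        cases ht'
        simp only [hp, if_pos]
        rw [ih _ _ (by simp at h ⊢; omega)]
        simp [stripQu]
      · simp only [hp, if_neg, Bool.not_eq_true]
        rw [ih t (c :: acc) (by simp at h ⊢; omega)]
        have hqt : ¬(c = 'q' ∧ ∃ t2, t = 'u' :: t2) := by
          rintro ⟨rfl, t2, rfl⟩
          exact hp (by simp [List.isPrefixOf])
        have hs : stripQu (c :: t) = c :: stripQu t := by
          cases t with
          | nil => cases c; simp [stripQu]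
          | cons d t2 =>
            have hnd : ¬(c = 'q' ∧ d = 'u') := fun ⟨h1, h2⟩ => hqt ⟨h1, t2, by rw [h2]⟩
            cases c; cases d
            simp_all [stripQu]
        rw [hs]; simp

lemma stripQu_eq_replace (l : List Char) :
    PySem.Chars.replace l ['q', 'u'] [] = stripQu l := by
  rw [PySem.Chars.replace]
  simp [replace_go_eq l.length l [] (le_refl _)]

-- B's builtin passes compute okW
lemma b_aux : ∀ l : List Char,
    (!(l.any (fun c => c < 'a' || 'z' < c)) && !decide ('q' ∈ stripQu l)) = okW l := by
  intro l
  induction l using stripQu.induct with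
  | case1 t ih =>
    simp only [stripQu, okW]
    simp only [List.any_cons] at *
    simp only [show ¬('q' < 'a') by decide, show ¬('z' < 'q') by decide,
      show ¬('u' < 'a') by decide, show ¬('z' < 'u') by decide] at *
    simpa using ih
  | case2 c t hne ih =>
    have hqt : ¬(c = 'q' ∧ ∃ t2, t = 'u' :: t2) := by
      rintro ⟨rfl, t2, rfl⟩
      exact hne t2 rfl rfl
    have hst : stripQu (c :: t) = c :: stripQu t := by
      cases t with
      | nil => cases c; simp [stripQu]
      | cons d t2 =>
        have hnd : ¬(c = 'q' ∧ d = 'u') := fun ⟨h1, h2⟩ => hqt ⟨h1, t2, by rw [h2]⟩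
        cases c; cases d
        simp_all [stripQu]
    by_cases hq : c = 'q'
    · subst hq
      have hmem : 'q' ∈ stripQu ('q' :: t) := by rw [hst]; simp
      have hokq : okW ('q' :: t) = false := by
        cases t with
        | nil => simp [okW]
        | cons d t2 =>
          have hd : d ≠ 'u' := fun h => hqt ⟨rfl, t2, by rw [h]⟩
          simp [okW, hd]
      rw [hokq]
      simp [hmem]
    · rw [okW_cons, if_neg hq, hst]
      by_cases hab : ('a' ≤ c ∧ c ≤ 'z')
      · rw [if_pos (by simp [hab.1, hab.2])]
        rw [← ih]
        simp [not_lt.2 hab.1, not_lt.2 hab.2, Ne.symm hq]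
      · have hcr : c < 'a' ∨ 'z' < c := by
          rcases not_and_or.1 hab with h1 | h2
          · exact Or.inl (not_le.1 h1)
          · exact Or.inr (not_le.1 h2)
        rw [if_neg (by rcases hcr with h | h <;> simp [not_le.2 h])]
        rcases hcr with h | h <;> simp [h]
  | case3 => simp [stripQu, okW]

lemma mem_iff_singleton_infix (a : Char) (l : List Char) : [a] <:+: l ↔ a ∈ l := by
  constructor
  · rintro ⟨s, t, rfl⟩; simp
  · intro h
    rcases List.append_of_mem h with ⟨s, t, rfl⟩
    exact ⟨s, t, by simp⟩

-- ===== VERDICT (by name: the statement is the Claim_ definition above) =====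
theorem is_boggle_word_spec : Claim_equal_is_boggle_word := by
  intro word _
  unfold Spec_is_boggle_word is_boggle_word is_boggle_word_alt
  simp only [PySem.Str.len_eq]
  by_cases hs : ((word.toList.length : Int) < 3)
  · rw [if_pos hs, if_pos hs]
  · rw [if_neg hs, if_neg hs]
    have hA := key_aux word.toList word.toList.length 0 (by omega)
    simp only [List.drop_zero, Nat.cast_zero] at hA
    rw [hA]
    have hrep : (PySem.Str.replace word "qu" "").toList = stripQu word.toList := by
      rw [PySem.Str.toList_replace]
      simpa using stripQu_eq_replace word.toList
    have hin : PySem.Str.isIn "q" (PySem.Str.replace word "qu" "") = decide ('q' ∈ stripQu word.toList) := by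
      rw [PySem.Str.isIn_eq]
      by_cases h : 'q' ∈ stripQu word.toList
      · have hinf : ("q".toList) <:+: (PySem.Str.replace word "qu" "").toList := by
          rw [hrep]
          simpa using (mem_iff_singleton_infix 'q' (stripQu word.toList)).mpr h
        rw [(PySem.Chars.isIn_iff_infix _ _).mpr hinf]
        simp [h]
      · have hninf : ¬ (("q".toList) <:+: (PySem.Str.replace word "qu" "").toList) := by
          rw [hrep]
          intro hc
          exact h ((mem_iff_singleton_infix 'q' (stripQu word.toList)).mp (by simpa using hc))
        have hfalse : PySem.Chars.isIn "q".toList (PySem.Str.replace word "qu" "").toList = false :=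
          Bool.eq_false_iff.mpr (fun hc => hninf ((PySem.Chars.isIn_iff_infix _ _).mp hc))
        rw [hfalse]
        simp [h]
    by_cases hany : word.toList.any (fun c => c < 'a' || 'z' < c) = true
    · rw [if_pos hany, ← b_aux word.toList]
      simp [hany]
    · have hf : word.toList.any (fun c => c < 'a' || 'z' < c) = false := Bool.eq_false_iff.mpr hany
      rw [if_neg hany, hin, ← b_aux word.toList, hf]
      simp
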